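-- pv_equiv track=rewrite | github.com/ygrepo/DS-GA-3001-001-Project | ts/n_beats/data_loading.py | collate_lines
-- ===== SOURCE A (Python) =====
-- def collate_lines(seq_list):
--     train_, val_, test_, idx_ = zip(*seq_list)
--     train_lens = [len(seq) for seq in train_]
--     seq_order = sorted(range(len(train_lens)), key=train_lens.__getitem__, reverse=True)
--     train = [train_[i] for i in seq_order]
--     val = [val_[i] for i in seq_order]
--     test = [test_[i] for i in seq_order]
--     idx = [idx_[i] for i in seq_order]
--     return train, val, test, idx
-- ===== SOURCE B (Python) =====
-- def collate_lines(seq_list):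
--     ordered = sorted(seq_list, key=lambda t: len(t[0]), reverse=True)
--     train, val, test, idx = zip(*ordered)
--     return list(train), list(val), list(test), list(idx)
-- ===== Notes on version B (the rewrite author's own statement) =====
-- stated objective: simpler
-- what changed: Sorts the records themselves with one stable reverse sort and unzips, instead of argsorting an index list by train length and performing four indexed gather passes.
import Mathlib
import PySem

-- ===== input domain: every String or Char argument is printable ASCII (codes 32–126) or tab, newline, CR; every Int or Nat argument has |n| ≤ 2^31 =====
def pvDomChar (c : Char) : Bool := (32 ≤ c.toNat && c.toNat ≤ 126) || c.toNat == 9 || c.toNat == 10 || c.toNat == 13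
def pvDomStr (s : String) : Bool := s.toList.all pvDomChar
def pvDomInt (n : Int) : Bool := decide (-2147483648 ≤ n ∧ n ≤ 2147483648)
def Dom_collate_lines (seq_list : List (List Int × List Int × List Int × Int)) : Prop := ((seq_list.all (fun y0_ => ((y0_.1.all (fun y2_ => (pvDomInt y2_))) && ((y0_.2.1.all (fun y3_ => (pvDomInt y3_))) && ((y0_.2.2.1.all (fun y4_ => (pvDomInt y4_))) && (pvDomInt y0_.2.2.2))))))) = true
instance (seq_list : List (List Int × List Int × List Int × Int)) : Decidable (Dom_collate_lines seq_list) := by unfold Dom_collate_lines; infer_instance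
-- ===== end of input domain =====

-- B replaces A's argsort-of-indices plus four indexed gather passes by one stable
-- reverse sort of the records followed by an unzip (objective: simpler).

-- ===== PORT A =====
def collate_lines (seq_list : List (List Int × List Int × List Int × Int)) : List (List Int) × List (List Int) × List (List Int) × List Int :=
  let train_ := seq_list.map (fun t => t.1)
  let val_ := seq_list.map (fun t => t.2.1)
  let test_ := seq_list.map (fun t => t.2.2.1)
  let idx_ := seq_list.map (fun t => t.2.2.2)
  let train_lens := train_.map (fun seq => (seq.length : Int))
  let seq_order := PySem.List.sorted (PySem.List.pyRange 0 (train_lens.length : Int) 1)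
      (fun i => PySem.List.pyGetD train_lens i 0) true
  let train := seq_order.map (fun i => PySem.List.pyGetD train_ i [])
  let val := seq_order.map (fun i => PySem.List.pyGetD val_ i [])
  let test := seq_order.map (fun i => PySem.List.pyGetD test_ i [])
  let idx := seq_order.map (fun i => PySem.List.pyGetD idx_ i 0)
  (train, val, test, idx)

-- ===== PORT B =====
def collate_lines_alt (seq_list : List (List Int × List Int × List Int × Int)) : List (List Int) × List (List Int) × List (List Int) × List Int :=
  let ordered := PySem.List.sorted seq_list (fun t => (t.1.length : Int)) true
  (ordered.map (fun t => t.1), ordered.map (fun t => t.2.1),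
   ordered.map (fun t => t.2.2.1), ordered.map (fun t => t.2.2.2))

-- ===== PRECONDITION & SPEC =====
-- Pre_ excludes only the empty list, on which A's 4-way unpack of zip(*seq_list) raises ValueError.
def Pre_collate_lines (seq_list : List (List Int × List Int × List Int × Int)) : Prop := seq_list ≠ []
instance (seq_list : List (List Int × List Int × List Int × Int)) : Decidable (Pre_collate_lines seq_list) := by unfold Pre_collate_lines; infer_instance
def pvWitness_collate_lines : (List (List Int × List Int × List Int × Int)) := [([1], [2], [3], 0), ([1, 2], [4], [5], 1)]
def Spec_collate_lines (seq_list : List (List Int × List Int × List Int × Int)) (out : List (List Int) × List (List Int) × List (List Int) × List Int) : Prop := out = collate_lines_alt seq_list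
instance (seq_list : List (List Int × List Int × List Int × Int)) (out : List (List Int) × List (List Int) × List (List Int) × List Int) : Decidable (Spec_collate_lines seq_list out) := by unfold Spec_collate_lines; infer_instance

-- ===== CLAIM (what is proved, stated in full; the proofs are below) =====
def Claim_equal_collate_lines : Prop := ∀ (seq_list : List (List Int × List Int × List Int × Int)), Dom_collate_lines seq_list → Pre_collate_lines seq_list → Spec_collate_lines seq_list (collate_lines seq_list)

-- ===== LEMMAS AND PROOFS =====

-- the dummy default used to express A's always-in-range gathers through total lookups
def pvDummy : List Int × List Int × List Int × Int := ([], [], [], 0)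

lemma pv_map_insertBy {α β : Type} (g : α → β) (bI : α → α → Bool) (b' : β → β → Bool)
    (h : ∀ a b, bI a b = b' (g a) (g b)) (x : α) (acc : List α) :
    (PySem.List.insertBy bI x acc).map g = PySem.List.insertBy b' (g x) (acc.map g) := by
  induction acc with
  | nil => simp [PySem.List.insertBy]
  | cons y ys ih =>
    simp only [PySem.List.insertBy, h]
    split_ifs with hb <;> simp [PySem.List.insertBy, hb, ih]

lemma pv_map_foldl_insertBy {α β : Type} (g : α → β) (bI : α → α → Bool) (b' : β → β → Bool)
    (h : ∀ a b, bI a b = b' (g a) (g b)) :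
    ∀ (is acc : List α),
    (is.foldl (fun acc x => PySem.List.insertBy bI x acc) acc).map g
      = (is.map g).foldl (fun acc x => PySem.List.insertBy b' x acc) (acc.map g) := by
  intro is
  induction is with
  | nil => intro acc; simp
  | cons x xs ih =>
    intro acc
    simp only [List.foldl_cons, List.map_cons, ih, pv_map_insertBy g bI b' h]

-- stable reverse argsort followed by a gather equals the stable reverse sort of the records
lemma pv_sorted_index_map (xs : List (List Int × List Int × List Int × Int)) :
    (PySem.List.sorted (PySem.List.pyRange 0 (xs.length : Int) 1)
        (fun i => ((PySem.List.pyGetD xs i pvDummy).1.length : Int)) true).map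
      (fun i => PySem.List.pyGetD xs i pvDummy)
      = PySem.List.sorted xs (fun t => (t.1.length : Int)) true := by
  rw [PySem.List.sorted_rev_eq_foldl_insertBy, PySem.List.sorted_rev_eq_foldl_insertBy]
  rw [pv_map_foldl_insertBy (fun i => PySem.List.pyGetD xs i pvDummy)
        (fun a b => decide (((PySem.List.pyGetD xs b pvDummy).1.length : Int)
                      < ((PySem.List.pyGetD xs a pvDummy).1.length : Int)))
        (fun a b => decide ((b.1.length : Int) < (a.1.length : Int))) (fun a b => rfl)]
  rw [PySem.List.map_pyGetD_pyRange_zero']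
  simp

-- the key list A builds, looked up at any index, is the key of the gathered record
lemma pv_key_bridge (xs : List (List Int × List Int × List Int × Int)) (i : Int) :
    PySem.List.pyGetD ((xs.map (fun t => t.1)).map (fun seq => (seq.length : Int))) i 0
      = ((PySem.List.pyGetD xs i pvDummy).1.length : Int) := by
  rw [List.map_map]
  exact PySem.List.pyGetD_map (fun t => (t.1.length : Int)) xs i pvDummy

-- a gather through a projected copy is the projection of the gather
lemma pv_gather {β : Type} (xs : List (List Int × List Int × List Int × Int))
    (f : (List Int × List Int × List Int × Int) → β) (d : β) (hd : f pvDummy = d)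
    (S : List Int) :
    S.map (fun i => PySem.List.pyGetD (xs.map f) i d)
      = (S.map (fun i => PySem.List.pyGetD xs i pvDummy)).map f := by
  rw [List.map_map]
  apply List.map_congr_left
  intro i _
  rw [← hd]
  exact PySem.List.pyGetD_map f xs i pvDummy

-- ===== VERDICT (by name: the statement is the Claim_ definition above) =====
theorem collate_lines_spec : Claim_equal_collate_lines := by
  intro seq_list _ _
  unfold Spec_collate_lines
  simp only [collate_lines, collate_lines_alt, pv_key_bridge, List.length_map]
  rw [pv_gather seq_list (fun t => t.1) [] rfl,
      pv_gather seq_list (fun t => t.2.1) [] rfl,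
      pv_gather seq_list (fun t => t.2.2.1) [] rfl,
      pv_gather seq_list (fun t => t.2.2.2) 0 rfl,
      pv_sorted_index_map]
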